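-- pv_equiv track=rewrite | github.com/KPZNet/MIS581Capstone | Code/BartLibs.py | IntersectAllStations
-- ===== SOURCE A (Python) =====
-- def IntersectStations(statA, statB):
--     """Returns intersection of two lists
--
--     Args:
--         statA (list): list of stations
--         statB (list): list of stations
--
--     Returns:
--         List of intersected stations
--     """
--     subSetA = [ele1 for ele1 in statA
--                for ele2 in statB if (ele1[1] == ele2[1] and ele1[2] == ele2[2])]
--     return subSetA
--
-- def IntersectAllStations(stats):
--     """Returns intersection of all stations in input list of stations
--
--     Args:
--         stats (list): list of list of stations
--
--     Returns:
--         List of intersected stations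
--     """
--     newList = []
--     riderList = []
--     for i, s in enumerate(stats):
--         sub = stats[i]
--         for j, k in enumerate(stats):
--             if i != j:
--                 subPrime = IntersectStations(sub, stats[j])
--                 sub = subPrime
--         newList.append(sub)
--         riderList.append(list(map(lambda x: x[0], sub)))
--     return riderList, newList
-- ===== SOURCE B (Python) =====
-- def IntersectAllStations(stats):
--     # Count each (lat, lon) key once per list; an element of list i appears in the
--     # final intersection prod_{j != i} count_j(key) times, in original order.
--     counters = []
--     for s in stats:
--         c = {}
--         for x in s:
--             k = (x[1], x[2])
--             c[k] = c.get(k, 0) + 1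
--         counters.append(c)
--     riderList = []
--     newList = []
--     for i, s in enumerate(stats):
--         sub = []
--         for x in s:
--             k = (x[1], x[2])
--             m = 1
--             for j, c in enumerate(counters):
--                 if j != i:
--                     m *= c.get(k, 0)
--                     if m == 0:
--                         break
--             sub.extend([x] * m)
--         newList.append(sub)
--         riderList.append([x[0] for x in sub])
--     return riderList, newList
-- ===== Notes on version B (the rewrite author's own statement) =====
-- stated objective: faster
-- what changed: Replaces A's repeated pairwise IntersectStations passes (nested scans whose intermediate lists grow by a factor per pass) with one coordinate-key count dictionary per list and, per element, a product of the other lists' counts (stopping at a zero factor), emitting the element that many times in order.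
import Mathlib
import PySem

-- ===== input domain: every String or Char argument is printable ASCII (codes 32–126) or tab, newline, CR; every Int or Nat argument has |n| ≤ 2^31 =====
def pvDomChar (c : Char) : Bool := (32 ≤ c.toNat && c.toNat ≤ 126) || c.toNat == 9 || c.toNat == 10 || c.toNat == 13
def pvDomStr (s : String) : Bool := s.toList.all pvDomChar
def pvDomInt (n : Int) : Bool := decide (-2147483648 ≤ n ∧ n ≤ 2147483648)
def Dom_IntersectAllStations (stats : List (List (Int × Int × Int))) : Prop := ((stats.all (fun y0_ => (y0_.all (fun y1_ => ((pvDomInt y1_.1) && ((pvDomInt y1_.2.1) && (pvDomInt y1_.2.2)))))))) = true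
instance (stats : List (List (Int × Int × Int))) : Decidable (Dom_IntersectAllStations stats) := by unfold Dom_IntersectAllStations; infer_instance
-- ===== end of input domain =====

-- B replaces A's repeated pairwise list intersections (nested scans whose intermediate
-- lists can grow by a factor per pass) by one coordinate-key count dict per list and a
-- per-element product of the other lists' counts (zero short-circuits): same return value,
-- measured faster in a timing run.

-- ===== PORT A =====
def IntersectStations (statA statB : List (Int × Int × Int)) : List (Int × Int × Int) :=
  statA.flatMap (fun e1 =>
    (statB.filter (fun e2 => e1.2.1 == e2.2.1 && e1.2.2 == e2.2.2)).map (fun _ => e1))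

-- 'sub = stats[i]' is transcribed as is.2: enumerate pairs i with stats[i] itself.
def IntersectAllStations (stats : List (List (Int × Int × Int))) : List (List Int) × (List (List (Int × Int × Int))) :=
  (PySem.List.enumerate stats).foldl
    (fun (acc : List (List Int) × List (List (Int × Int × Int))) is =>
      let sub := (PySem.List.enumerate stats).foldl
        (fun sub jk => if is.1 ≠ jk.1 then IntersectStations sub jk.2 else sub) is.2
      (acc.1 ++ [sub.map (fun x => x.1)], acc.2 ++ [sub]))
    ([], [])

-- ===== PORT B =====
def pvKey (x : Int × Int × Int) : Int × Int := (x.2.1, x.2.2)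

-- the 'for j, c in enumerate(counters): … if m == 0: break' loop of B
def pvMulLoop (i : Int) (k : Int × Int) :
    List (Int × PySem.Dict (Int × Int) Int) → Int → Int
  | [], m => m
  | jc :: L, m =>
    if jc.1 ≠ i then
      let m' := m * jc.2.getD k 0
      if m' == 0 then m' else pvMulLoop i k L m'
    else pvMulLoop i k L m

def pvCounter (s : List (Int × Int × Int)) : PySem.Dict (Int × Int) Int :=
  s.foldl (fun c x => c.insert (pvKey x) (c.getD (pvKey x) 0 + 1)) PySem.Dict.empty

def IntersectAllStations_alt (stats : List (List (Int × Int × Int))) : List (List Int) × (List (List (Int × Int × Int))) :=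
  let counters := stats.map pvCounter
  (PySem.List.enumerate stats).foldl
    (fun (acc : List (List Int) × List (List (Int × Int × Int))) is =>
      let sub := is.2.flatMap (fun x =>
        let m := pvMulLoop is.1 (pvKey x) (PySem.List.enumerate counters) 1
        List.replicate m.toNat x)
      (acc.1 ++ [sub.map (fun x => x.1)], acc.2 ++ [sub]))
    ([], [])

-- ===== PRECONDITION & SPEC =====
def Spec_IntersectAllStations (stats : List (List (Int × Int × Int))) (out : List (List Int) × (List (List (Int × Int × Int)))) : Prop := out = IntersectAllStations_alt stats
instance (stats : List (List (Int × Int × Int))) (out : List (List Int) × (List (List (Int × Int × Int)))) : Decidable (Spec_IntersectAllStations stats out) := by unfold Spec_IntersectAllStations; infer_instance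

-- ===== CLAIM (what is proved, stated in full; the proofs are below) =====
def Claim_equal_IntersectAllStations : Prop := ∀ (stats : List (List (Int × Int × Int))), Dom_IntersectAllStations stats → Spec_IntersectAllStations stats (IntersectAllStations stats)

-- ===== LEMMAS AND PROOFS =====

-- number of stations of b matching key k
def pvCnt (b : List (Int × Int × Int)) (k : Int × Int) : Nat :=
  b.countP (fun e2 => pvKey e2 == k)

theorem IntersectStations_eq (a b : List (Int × Int × Int)) :
    IntersectStations a b = a.flatMap (fun x => List.replicate (pvCnt b (pvKey x)) x) := by
  unfold IntersectStations pvCnt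
  congr 1
  funext x
  rw [List.map_const', List.countP_eq_length_filter]
  have hp : ∀ e2 : Int × Int × Int,
      (x.2.1 == e2.2.1 && x.2.2 == e2.2.2) = (pvKey e2 == pvKey x) := by
    intro e2
    rw [Bool.eq_iff_iff]
    simp only [Bool.and_eq_true, beq_iff_eq, pvKey, Prod.mk.injEq]
    constructor <;> (rintro ⟨h1, h2⟩; exact ⟨h1.symm, h2.symm⟩)
  simp only [hp]

theorem flatMap_replicate_replicate {α : Type} (n m : Nat) (x : α) :
    (List.replicate n x).flatMap (fun _ => List.replicate m x) = List.replicate (n * m) x := by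
  rw [List.flatMap, List.map_replicate, List.flatten_replicate_replicate]

-- the product of match-counts over (index, list) pairs with index ≠ i
def pvProd (i : Int) (L : List (Int × List (Int × Int × Int))) (k : Int × Int) : Nat :=
  L.foldl (fun m jk => if i ≠ jk.1 then m * pvCnt jk.2 k else m) 1

theorem pvProd_foldl_start (i : Int) (k : Int × Int) :
    ∀ (L : List (Int × List (Int × Int × Int))) (c : Nat),
      L.foldl (fun m jk => if i ≠ jk.1 then m * pvCnt jk.2 k else m) c
        = c * pvProd i L k := by
  intro L
  induction L with
  | nil => intro c; simp [pvProd]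
  | cons jk L ih =>
    intro c
    by_cases h : i = jk.1
    · rw [List.foldl_cons, if_neg (not_not_intro h), ih c]
      congr 1
      rw [pvProd, pvProd, List.foldl_cons, if_neg (not_not_intro h)]
    · have h2 : pvProd i (jk :: L) k = (1 * pvCnt jk.2 k) * pvProd i L k := by
        rw [pvProd, List.foldl_cons, if_pos h, ih]
      rw [List.foldl_cons, if_pos h, ih (c * pvCnt jk.2 k), h2]
      ring

theorem innerFold_eq (i : Int) :
    ∀ (L : List (Int × List (Int × Int × Int))) (a : List (Int × Int × Int)),
      L.foldl (fun sub jk => if i ≠ jk.1 then IntersectStations sub jk.2 else sub) a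
        = a.flatMap (fun x => List.replicate (pvProd i L (pvKey x)) x) := by
  intro L
  induction L with
  | nil =>
    intro a
    simp [pvProd]
  | cons jk L ih =>
    intro a
    by_cases h : i = jk.1
    · rw [List.foldl_cons, if_neg (not_not_intro h), ih]
      congr 1
      funext x
      congr 1
      rw [pvProd, pvProd, List.foldl_cons, if_neg (not_not_intro h)]
    · rw [List.foldl_cons, if_pos h, ih, IntersectStations_eq, List.flatMap_assoc]
      congr 1
      funext x
      calc (List.replicate (pvCnt jk.2 (pvKey x)) x).flatMap
              (fun y => List.replicate (pvProd i L (pvKey y)) y)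
          = (List.replicate (pvCnt jk.2 (pvKey x)) x).flatMap
              (fun _ => List.replicate (pvProd i L (pvKey x)) x) := by
            rw [List.flatMap, List.flatMap, List.map_replicate, List.map_replicate]
        _ = List.replicate (pvCnt jk.2 (pvKey x) * pvProd i L (pvKey x)) x :=
            flatMap_replicate_replicate _ _ _
        _ = List.replicate (pvProd i (jk :: L) (pvKey x)) x := by
            have h2 : pvProd i (jk :: L) (pvKey x)
                = (1 * pvCnt jk.2 (pvKey x)) * pvProd i L (pvKey x) := by
              rw [pvProd, List.foldl_cons, if_pos h, pvProd_foldl_start]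
            rw [h2, one_mul]

theorem pvCounter_getD (s : List (Int × Int × Int)) (k : Int × Int) :
    (pvCounter s).getD k 0 = (pvCnt s k : Int) := by
  unfold pvCounter pvCnt
  have h1 : s.foldl (fun (c : PySem.Dict (Int × Int) Int) x =>
        c.insert (pvKey x) (c.getD (pvKey x) 0 + 1)) PySem.Dict.empty
      = (s.map pvKey).foldl (fun d k => d.insert k (d.getD k 0 + 1)) PySem.Dict.empty := by
    rw [List.foldl_map]
  rw [h1, PySem.Dict.getD_foldl_insert_add_one, PySem.Dict.getD_empty, zero_add]
  norm_cast
  rw [List.count_eq_countP, List.countP_map]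
  rfl

theorem enumerate_map {α β : Type} (f : α → β) (l : List α) :
    ∀ s, PySem.List.enumerate (l.map f) s
      = (PySem.List.enumerate l s).map (fun p => (p.1, f p.2)) := by
  induction l with
  | nil => intro s; simp [PySem.List.enumerate_nil]
  | cons x l ih => intro s; simp [PySem.List.enumerate_cons, ih]

theorem intFold_eq (i : Int) (k : Int × Int) :
    ∀ (L : List (Int × List (Int × Int × Int))) (c : Nat),
      L.foldl (fun m jc => if jc.1 ≠ i then m * ((pvCnt jc.2 k : Nat) : Int) else m) ((c : Nat) : Int)
        = ((L.foldl (fun m jk => if i ≠ jk.1 then m * pvCnt jk.2 k else m) c : Nat) : Int) := by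
  intro L
  induction L with
  | nil => intro c; simp
  | cons jk L ih =>
    intro c
    by_cases h : i = jk.1
    · rw [List.foldl_cons, List.foldl_cons, if_neg (not_not_intro h.symm),
        if_neg (not_not_intro h)]
      exact ih c
    · rw [List.foldl_cons, List.foldl_cons, if_pos (Ne.symm h), if_pos h]
      rw [show ((c : Nat) : Int) * ((pvCnt jk.2 k : Nat) : Int)
            = ((c * pvCnt jk.2 k : Nat) : Int) from by push_cast; ring]
      exact ih (c * pvCnt jk.2 k)

theorem foldl_mul_zero (i : Int) (k : Int × Int) :
    ∀ L : List (Int × PySem.Dict (Int × Int) Int),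
      L.foldl (fun m jc => if jc.1 ≠ i then m * jc.2.getD k 0 else m) 0 = 0 := by
  intro L
  induction L with
  | nil => rfl
  | cons jc L ih =>
    rw [List.foldl_cons]
    by_cases h : jc.1 = i
    · rw [if_neg (not_not_intro h)]; exact ih
    · rw [if_pos h, zero_mul]; exact ih

theorem pvMulLoop_eq_foldl (i : Int) (k : Int × Int) :
    ∀ (L : List (Int × PySem.Dict (Int × Int) Int)) (m : Int),
      pvMulLoop i k L m
        = L.foldl (fun m jc => if jc.1 ≠ i then m * jc.2.getD k 0 else m) m := by
  intro L
  induction L with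
  | nil => intro m; rfl
  | cons jc L ih =>
    intro m
    rw [pvMulLoop, List.foldl_cons]
    by_cases h : jc.1 = i
    · rw [if_neg (not_not_intro h), if_neg (not_not_intro h)]; exact ih m
    · rw [if_pos h, if_pos h]
      by_cases h0 : m * jc.2.getD k 0 = 0
      · rw [if_pos (by simpa using h0), h0, foldl_mul_zero]
      · rw [if_neg (by simpa using h0)]; exact ih _

theorem sub_eq (stats : List (List (Int × Int × Int))) (i : Int) (s : List (Int × Int × Int)) :
    (PySem.List.enumerate stats).foldl
        (fun sub jk => if i ≠ jk.1 then IntersectStations sub jk.2 else sub) s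
      = s.flatMap (fun x => List.replicate
          (pvMulLoop i (pvKey x) (PySem.List.enumerate (stats.map pvCounter)) 1).toNat x) := by
  rw [innerFold_eq]
  simp only [pvMulLoop_eq_foldl]
  congr 1
  funext x
  rw [enumerate_map pvCounter stats 0, List.foldl_map]
  dsimp only
  simp only [pvCounter_getD]
  have h2 := intFold_eq i (pvKey x) (PySem.List.enumerate stats 0) 1
  rw [Nat.cast_one] at h2
  rw [h2, Int.toNat_natCast, pvProd]

-- ===== VERDICT (by name: the statement is the Claim_ definition above) =====
theorem IntersectAllStations_spec : Claim_equal_IntersectAllStations := by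
  intro stats _
  unfold Spec_IntersectAllStations IntersectAllStations IntersectAllStations_alt
  congr 1
  funext acc is
  dsimp only
  rw [sub_eq stats is.1 is.2]
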